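-- pv_equiv track=rewrite | github.com/JeongMin-98/StudyForCodingtest | Baekjoon/week3/cleancode/sol.py | get_rotate_count
-- ===== SOURCE A (Python) =====
-- def get_rotate_count(arr):
--     rotate_count = 0
--     standard = 1000
--     n_count = int(1e9)
--
--     while n_count > 100:
--         n_count = 0
--
--         for i in range(len(arr)):
--             if arr[i] > standard:
--                 n_count += 1
--         standard += 1000
--         rotate_count += 1
--     return rotate_count
-- ===== SOURCE B (Python) =====
-- def get_rotate_count(arr):
--     # 101st largest element decides the answer; ceil-divide it by 1000.
--     if len(arr) <= 100:
--         return 1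
--     v = sorted(arr, reverse=True)[100]
--     return max(1, -(-v // 1000))
-- ===== Notes on version B (the rewrite author's own statement) =====
-- stated objective: faster
-- what changed: Instead of rescanning the whole array once per successive 1000-threshold until at most 100 elements exceed it, B sorts once, reads the 101st-largest element and computes the answer by one ceiling division (answer = max(1, ceil(v/1000))).
import Mathlib
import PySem

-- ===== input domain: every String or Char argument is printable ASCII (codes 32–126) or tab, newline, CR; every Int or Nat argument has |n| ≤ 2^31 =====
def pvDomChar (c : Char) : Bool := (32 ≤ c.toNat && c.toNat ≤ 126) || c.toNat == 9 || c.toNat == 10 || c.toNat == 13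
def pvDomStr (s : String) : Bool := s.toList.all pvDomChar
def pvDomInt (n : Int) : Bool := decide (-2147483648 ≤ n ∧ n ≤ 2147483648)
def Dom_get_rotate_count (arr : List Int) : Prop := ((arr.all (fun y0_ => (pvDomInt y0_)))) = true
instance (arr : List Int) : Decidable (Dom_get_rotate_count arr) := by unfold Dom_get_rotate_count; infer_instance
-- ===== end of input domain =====

-- B replaces A's repeated rescans (one per 1000-threshold) by a single sort plus a ceiling
-- division on the 101st-largest element (a different algorithm, same result).

-- ===== PORT A =====

-- upper bound on the elements, used only for A's termination measure
def pvMaxA (arr : List Int) : Int := arr.foldl max 0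

-- A's inner `for i in range(len(arr)): if arr[i] > t: n_count += 1` equals a countP
-- (needed above the port: the termination argument of the while loop cites it)
theorem pv_inner_count (arr : List Int) (t : Int) :
    (PySem.List.pyRange 0 (PySem.List.len arr)).foldl
      (fun acc i => if PySem.List.pyGetD arr i 0 > t then acc + 1 else acc) (0 : Int)
    = (arr.countP (fun x => decide (t < x)) : Int) := by
  rw [PySem.List.foldl_pyRange_zero_pyGetD arr 0 (fun acc x => if x > t then acc + 1 else acc) 0]
  have h := PySem.List.foldl_count_if (fun x => decide (t < x)) arr 0
  simpa [gt_iff_lt] using h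

theorem pv_lt_max_of_count (arr : List Int) (t : Int)
    (h : (100 : Int) < (PySem.List.pyRange 0 (PySem.List.len arr)).foldl
      (fun acc i => if PySem.List.pyGetD arr i 0 > t then acc + 1 else acc) (0 : Int)) :
    t < pvMaxA arr := by
  rw [pv_inner_count] at h
  have hpos : 0 < arr.countP (fun x => decide (t < x)) := by omega
  obtain ⟨x, hx, hxt⟩ := List.countP_pos_iff.mp hpos
  have hle := (PySem.List.le_foldl_max arr 0).2 x hx
  simp only [decide_eq_true_eq] at hxt
  unfold pvMaxA
  omega

-- the `while n_count > 100:` loop of A, state = (standard, rotate_count, n_count)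
def pvWhileA (arr : List Int) (standard rotate_count n_count : Int) : Int :=
  if n_count > 100 then
    let c : Int := (PySem.List.pyRange 0 (PySem.List.len arr)).foldl
        (fun acc i => if PySem.List.pyGetD arr i 0 > standard then acc + 1 else acc) 0
    pvWhileA arr (standard + 1000) (rotate_count + 1) c
  else rotate_count
termination_by (pvMaxA arr + 1000 - standard).toNat + (if 100 < n_count then 1 else 0)
decreasing_by
  rename_i hn
  simp only [dite_eq_ite]
  by_cases hc : (100 : Int) < (PySem.List.pyRange 0 (PySem.List.len arr)).foldl
      (fun acc i => if PySem.List.pyGetD arr i 0 > standard then acc + 1 else acc) (0 : Int)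
  · have hlt := pv_lt_max_of_count arr standard hc
    rw [if_pos hc, if_pos (show (100 : Int) < n_count from hn)]
    omega
  · rw [if_neg hc, if_pos (show (100 : Int) < n_count from hn)]
    omega

def get_rotate_count (arr : List Int) : Int :=
  -- rotate_count = 0; standard = 1000; n_count = int(1e9); while-loop as above
  pvWhileA arr 1000 0 1000000000

-- ===== PORT B =====
def get_rotate_count_alt (arr : List Int) : Int :=
  if PySem.List.len arr ≤ 100 then 1
  else
    let v := PySem.List.pyGetD (PySem.List.sorted arr (fun x => x) true) 100 0
    max 1 (-(PySem.Int.floordiv (-v) 1000))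

-- ===== PRECONDITION & SPEC =====
def Spec_get_rotate_count (arr : List Int) (out : Int) : Prop := out = get_rotate_count_alt arr
instance (arr : List Int) (out : Int) : Decidable (Spec_get_rotate_count arr out) := by unfold Spec_get_rotate_count; infer_instance

-- ===== CLAIM (what is proved, stated in full; the proofs are below) =====
def Claim_equal_get_rotate_count : Prop := ∀ (arr : List Int), Dom_get_rotate_count arr → Spec_get_rotate_count arr (get_rotate_count arr)

-- ===== LEMMAS AND PROOFS =====

-- for a > 100-long array: at most 100 elements exceed t iff the 101st largest is ≤ t
theorem pv_count_le_iff (arr : List Int) (hlen : 100 < arr.length) (t : Int) :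
    (arr.countP (fun x => decide (t < x)) ≤ 100)
      ↔ PySem.List.pyGetD (PySem.List.sorted arr (fun x => x) true) 100 0 ≤ t := by
  have hperm := PySem.List.sorted_perm arr (fun x => x) true
  have hl : (PySem.List.sorted arr (fun x => x) true).length = arr.length :=
    PySem.List.length_sorted arr (fun x => x) true
  set l := PySem.List.sorted arr (fun x => x) true with hldef
  have h100 : 100 < l.length := by omega
  have hpw := PySem.List.sorted_pairwise_rev arr (fun x => x)
  rw [← hldef] at hpw
  have hmono : ∀ i j (_ : i < l.length) (hj : j < l.length), i ≤ j → l[j] ≤ l[i] := by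
    intro i j hi hj hij
    rcases eq_or_lt_of_le hij with rfl | hlt
    · exact le_refl _
    · exact List.pairwise_iff_getElem.mp hpw i j hi hj hlt
  have hv : PySem.List.pyGetD l 100 0 = l[100] := by
    rw [PySem.List.pyGetD_ofNat' l 100 0, List.getD_eq_getElem l 0 h100]
  rw [hv, ← hperm.countP_eq]
  constructor
  · intro hc
    by_contra hvt
    push_neg at hvt
    have htake : ∀ a ∈ l.take 101, decide (t < a) = true := by
      intro a ha
      obtain ⟨i, hi, rfl⟩ := List.mem_iff_getElem.mp ha
      rw [List.getElem_take]
      have hi' : i < l.length := by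
        have := List.length_take_le 101 l; omega
      have hile : i ≤ 100 := by
        have := hi; rw [List.length_take] at this; omega
      have := hmono i 100 hi' h100 hile
      simp only [decide_eq_true_eq]
      omega
    have hlen101 : (l.take 101).length = 101 := by
      rw [List.length_take]; omega
    have h1 : (l.take 101).countP (fun x => decide (t < x)) = 101 := by
      rw [List.countP_eq_length.mpr htake, hlen101]
    have h2 : l.countP (fun x => decide (t < x))
        = (l.take 101).countP (fun x => decide (t < x))
          + (l.drop 101).countP (fun x => decide (t < x)) := by
      conv_lhs => rw [← List.take_append_drop 101 l]
      rw [List.countP_append]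
    omega
  · intro hvt
    have hdrop : (l.drop 100).countP (fun x => decide (t < x)) = 0 := by
      rw [List.countP_eq_zero]
      intro a ha
      obtain ⟨k, hk, rfl⟩ := List.mem_iff_getElem.mp ha
      rw [List.getElem_drop]
      have hk' : 100 + k < l.length := by
        have := hk; rw [List.length_drop] at this; omega
      have := hmono 100 (100 + k) h100 hk' (by omega)
      simp only [decide_eq_true_eq, not_lt]
      omega
    have h2 : l.countP (fun x => decide (t < x))
        = (l.take 100).countP (fun x => decide (t < x))
          + (l.drop 100).countP (fun x => decide (t < x)) := by
      conv_lhs => rw [← List.take_append_drop 100 l]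
      rw [List.countP_append]
    have h3 : (l.take 100).countP (fun x => decide (t < x)) ≤ (l.take 100).length :=
      List.countP_le_length
    have h4 : (l.take 100).length ≤ 100 := by
      rw [List.length_take]; omega
    omega

-- the while loop, started at threshold 1000*m with rotate_count = m-1, reaches K:
-- the first index ≥ m at which the count drops to ≤ 100
theorem pvWhileA_reaches (arr : List Int) (K : Int)
    (hstop : (arr.countP (fun x => decide (1000 * K < x)) : Int) ≤ 100)
    (hgo : ∀ m : Int, 1 ≤ m → m < K → 100 < (arr.countP (fun x => decide (1000 * m < x)) : Int)) :
    ∀ (n : Nat) (m : Int), (K - m).toNat = n → 1 ≤ m → m ≤ K →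
      ∀ nc : Int, 100 < nc → pvWhileA arr (1000 * m) (m - 1) nc = K := by
  intro n
  induction n with
  | zero =>
    intro m hn h1 h2 nc hnc
    have hm : m = K := by omega
    subst hm
    rw [pvWhileA]
    rw [if_pos (by exact hnc)]
    rw [pvWhileA]
    rw [if_neg (by rw [pv_inner_count]; omega)]
    omega
  | succ n ih =>
    intro m hn h1 h2 nc hnc
    have hmK : m < K := by omega
    rw [pvWhileA]
    rw [if_pos (by exact hnc)]
    have harg1 : 1000 * m + 1000 = 1000 * (m + 1) := by ring
    have harg2 : m - 1 + 1 = (m + 1) - 1 := by ring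
    rw [harg1, harg2, pv_inner_count]
    exact ih (m + 1) (by omega) (by omega) (by omega) _ (hgo m h1 hmK)

-- ===== VERDICT (by name: the statement is the Claim_ definition above) =====
theorem get_rotate_count_spec : Claim_equal_get_rotate_count := by
  intro arr _
  show get_rotate_count arr = get_rotate_count_alt arr
  unfold get_rotate_count get_rotate_count_alt
  by_cases hlen : arr.length ≤ 100
  · rw [if_pos (by simp only [PySem.List.len_eq]; exact_mod_cast hlen)]
    rw [pvWhileA, if_pos (by norm_num)]
    rw [pvWhileA]
    rw [if_neg (by
      rw [pv_inner_count]
      have := List.countP_le_length (p := fun x => decide ((1000 : Int) < x)) (l := arr)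
      omega)]
    norm_num
  · push_neg at hlen
    rw [if_neg (by simp only [PySem.List.len_eq]; push_neg; exact_mod_cast hlen)]
    set v := PySem.List.pyGetD (PySem.List.sorted arr (fun x => x) true) 100 0 with hvdef
    obtain ⟨hq1, hq2⟩ := (PySem.Int.neg_floordiv_neg_eq_iff_of_pos
      (a := v) (b := 1000) (q := -(PySem.Int.floordiv (-v) 1000))
      (by norm_num)).mp rfl
    set q := -(PySem.Int.floordiv (-v) 1000) with hqdef
    set K := max 1 q with hKdef
    have hK1 : 1 ≤ K := le_max_left _ _
    have hqK : q ≤ K := le_max_right _ _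
    have hKcase : K = 1 ∨ K = q := by
      rcases le_total 1 q with h | h
      · right; rw [hKdef, max_eq_right h]
      · left; rw [hKdef, max_eq_left h]
    have hiff := pv_count_le_iff arr hlen
    have hstop : (arr.countP (fun x => decide (1000 * K < x)) : Int) ≤ 100 := by
      have hvK : v ≤ 1000 * K := by omega
      have := (hiff (1000 * K)).mpr hvK
      omega
    have hgo : ∀ m : Int, 1 ≤ m → m < K →
        100 < (arr.countP (fun x => decide (1000 * m < x)) : Int) := by
      intro m h1 h2
      have hK2 : 2 ≤ K := by omega
      have hKq : K = q := by omega
      have hvm : ¬ v ≤ 1000 * m := by omega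
      have := (hiff (1000 * m)).not.mpr (by omega)
      omega
    have hmain := pvWhileA_reaches arr K hstop hgo (K - 1).toNat 1 rfl (by omega) hK1
      1000000000 (by norm_num)
    norm_num at hmain
    exact hmain
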